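-- pv_equiv track=rewrite | github.com/shapeshift-legacy/watchtower | ingester/xrp/xrp_block_ingester.py | group_transactions_by_address
-- ===== SOURCE A (Python) =====
-- def group_transactions_by_address(addresses, transactions):
--     by_address = {}
--     for t in transactions:
--         from_address = t.get('from')
--         to_address = t.get('to')
--         if from_address in addresses:
--             txs = by_address.get(from_address) if isinstance(by_address.get(from_address), list) else list()
--             txs.append(t)
--             by_address[from_address] = txs
--
--         # only add if not a self send
--         if to_address in addresses and to_address != from_address:
--             to_tx = t.copy()
--             txs = by_address.get(to_address) if isinstance(by_address.get(to_address), list) else list()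
--             txs.append(to_tx)
--             by_address[to_address] = txs
--     return by_address
-- ===== SOURCE B (Python) =====
-- def group_transactions_by_address(addresses, transactions):
--     # Pass 1: collect the involved addresses in first-involvement order.
--     addrset = set(addresses)
--     keys = []
--     seen = set()
--     for t in transactions:
--         f = t.get('from')
--         to = t.get('to')
--         if f in addrset and f not in seen:
--             seen.add(f)
--             keys.append(f)
--         if to in addrset and to != f and to not in seen:
--             seen.add(to)
--             keys.append(to)
--     # Pass 2: for each involved address, gather its transactions in order.
--     result = {}
--     for a in keys:
--         txs = []
--         for t in transactions:
--             f = t.get('from')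
--             to = t.get('to')
--             if a == f:
--                 txs.append(t)
--             if a == to and to != f:
--                 txs.append(t.copy())
--         result[a] = txs
--     return result
-- ===== Notes on version B (the rewrite author's own statement) =====
-- stated objective: alternative
-- what changed: A builds the dict in a single pass over transactions with list-membership tests on addresses; B first collects the involved addresses in first-involvement order (one set-based pass) and then scans the transactions once per involved address, inserting each key with its complete list.
import Mathlib
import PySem

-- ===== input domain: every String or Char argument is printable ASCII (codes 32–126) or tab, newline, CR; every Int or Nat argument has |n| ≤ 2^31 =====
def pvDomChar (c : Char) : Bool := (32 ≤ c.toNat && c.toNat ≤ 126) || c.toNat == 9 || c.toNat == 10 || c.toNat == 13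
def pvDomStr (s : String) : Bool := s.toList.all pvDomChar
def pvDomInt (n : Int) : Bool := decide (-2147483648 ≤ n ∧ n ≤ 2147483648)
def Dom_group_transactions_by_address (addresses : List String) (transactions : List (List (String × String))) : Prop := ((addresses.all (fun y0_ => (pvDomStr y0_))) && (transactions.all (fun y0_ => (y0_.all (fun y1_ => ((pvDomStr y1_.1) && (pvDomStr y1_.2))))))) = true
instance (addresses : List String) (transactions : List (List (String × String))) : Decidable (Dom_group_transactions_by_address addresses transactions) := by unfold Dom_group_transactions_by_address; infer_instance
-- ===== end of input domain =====

-- B replaces A's single dict-building pass with a key-collection pass followed by one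
-- scan of the transactions per involved address (alternative decomposition, not faster).
-- Equivalence is about the RETURN value; A's from-entries alias the caller's dicts, B's do too.

-- ===== PORT A =====
def group_transactions_by_address (addresses : List String) (transactions : List (List (String × String))) : List (String × List (List (String × String))) :=
  (transactions.foldl (fun by_address t =>
    let from_address := (PySem.Dict.mk t).get? "from"
    let to_address := (PySem.Dict.mk t).get? "to"
    let d1 := match from_address with
      | some fa =>
          if fa ∈ addresses then
            by_address.insert fa (by_address.getD fa [] ++ [t])
          else by_address
      | none => by_address
    match to_address with
    | some ta =>
        if ta ∈ addresses ∧ to_address ≠ from_address then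
          d1.insert ta (d1.getD ta [] ++ [t])  -- t.copy() is t by value
        else d1
    | none => d1) PySem.Dict.empty).items

-- ===== PORT B =====
def group_transactions_by_address_alt (addresses : List String) (transactions : List (List (String × String))) : List (String × List (List (String × String))) :=
  let addrset := PySem.Set.ofList addresses
  -- pass 1: involved addresses in first-involvement order (keys list + seen set)
  let ks := (transactions.foldl (fun (p : List String × PySem.Set String) t =>
      let f := (PySem.Dict.mk t).get? "from"
      let toa := (PySem.Dict.mk t).get? "to"
      let p1 := match f with
        | some fa =>
            if PySem.Set.contains addrset fa ∧ ¬ PySem.Set.contains p.2 fa then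
              (p.1 ++ [fa], PySem.Set.add p.2 fa)
            else p
        | none => p
      match toa with
      | some ta =>
          if PySem.Set.contains addrset ta ∧ toa ≠ f ∧ ¬ PySem.Set.contains p1.2 ta then
            (p1.1 ++ [ta], PySem.Set.add p1.2 ta)
          else p1
      | none => p1) ([], PySem.Set.empty)).1
  -- pass 2: one scan of the transactions per involved address
  (ks.foldl (fun res a =>
      res.insert a (transactions.foldl (fun txs t =>
        let f := (PySem.Dict.mk t).get? "from"
        let toa := (PySem.Dict.mk t).get? "to"
        let txs1 := if some a = f then txs ++ [t] else txs
        if some a = toa ∧ toa ≠ f then txs1 ++ [t] else txs1) [])) PySem.Dict.empty).items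

-- ===== PRECONDITION & SPEC =====
def Spec_group_transactions_by_address (addresses : List String) (transactions : List (List (String × String))) (out : List (String × List (List (String × String)))) : Prop := out = group_transactions_by_address_alt addresses transactions
instance (addresses : List String) (transactions : List (List (String × String))) (out : List (String × List (List (String × String)))) : Decidable (Spec_group_transactions_by_address addresses transactions out) := by unfold Spec_group_transactions_by_address; infer_instance

-- ===== CLAIM (what is proved, stated in full; the proofs are below) =====
def Claim_equal_group_transactions_by_address : Prop := ∀ (addresses : List String) (transactions : List (List (String × String))), Dom_group_transactions_by_address addresses transactions → Spec_group_transactions_by_address addresses transactions (group_transactions_by_address addresses transactions)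

-- ===== LEMMAS AND PROOFS =====

-- the addresses a transaction t contributes a dict key for, in A's order (from, then to)
def pvEvs (addresses : List String) (t : List (String × String)) : List String :=
  (match (PySem.Dict.mk t).get? "from" with
   | some fa => if fa ∈ addresses then [fa] else []
   | none => []) ++
  (match (PySem.Dict.mk t).get? "to" with
   | some ta => if ta ∈ addresses ∧ (PySem.Dict.mk t).get? "to" ≠ (PySem.Dict.mk t).get? "from" then [ta] else []
   | none => [])

-- the entries t contributes to address a's list
def pvContrib (addresses : List String) (a : String) (t : List (String × String)) : List (List (String × String)) :=
  (match (PySem.Dict.mk t).get? "from" with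
   | some fa => if fa ∈ addresses ∧ fa = a then [t] else []
   | none => []) ++
  (match (PySem.Dict.mk t).get? "to" with
   | some ta => if ta ∈ addresses ∧ (PySem.Dict.mk t).get? "to" ≠ (PySem.Dict.mk t).get? "from" ∧ ta = a then [t] else []
   | none => [])

def pvCollect (addresses : List String) (a : String) (ts : List (List (String × String))) : List (List (String × String)) :=
  ts.flatMap (pvContrib addresses a)

def pvMkMap (K : List String) (g : String → List (List (String × String))) : PySem.Dict String (List (List (String × String))) :=
  PySem.Dict.mk (K.map (fun k => (k, g k)))


-- A's loop body, named for the proofs (identical to the lambda in the port of A)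
def pvStepA (addresses : List String) (by_address : PySem.Dict String (List (List (String × String)))) (t : List (String × String)) : PySem.Dict String (List (List (String × String))) :=
  let from_address := (PySem.Dict.mk t).get? "from"
  let to_address := (PySem.Dict.mk t).get? "to"
  let d1 := match from_address with
    | some fa =>
        if fa ∈ addresses then
          by_address.insert fa (by_address.getD fa [] ++ [t])
        else by_address
    | none => by_address
  match to_address with
  | some ta =>
      if ta ∈ addresses ∧ to_address ≠ from_address then
        d1.insert ta (d1.getD ta [] ++ [t])
      else d1
  | none => d1

-- B's key-collection loop body, named for the proofs
def pvStepK (addresses : List String) (p : List String × PySem.Set String) (t : List (String × String)) : List String × PySem.Set String :=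
  let f := (PySem.Dict.mk t).get? "from"
  let toa := (PySem.Dict.mk t).get? "to"
  let p1 := match f with
    | some fa =>
        if PySem.Set.contains (PySem.Set.ofList addresses) fa ∧ ¬ PySem.Set.contains p.2 fa then
          (p.1 ++ [fa], PySem.Set.add p.2 fa)
        else p
    | none => p
  match toa with
  | some ta =>
      if PySem.Set.contains (PySem.Set.ofList addresses) ta ∧ toa ≠ f ∧ ¬ PySem.Set.contains p1.2 ta then
        (p1.1 ++ [ta], PySem.Set.add p1.2 ta)
      else p1
  | none => p1

-- B's inner per-address loop body, named for the proofs
def pvStepI (a : String) (txs : List (List (String × String))) (t : List (String × String)) : List (List (String × String)) :=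
  let f := (PySem.Dict.mk t).get? "from"
  let toa := (PySem.Dict.mk t).get? "to"
  let txs1 := if some a = f then txs ++ [t] else txs
  if some a = toa ∧ toa ≠ f then txs1 ++ [t] else txs1

theorem pvA_eq_foldl (addresses : List String) (ts : List (List (String × String))) :
    group_transactions_by_address addresses ts = (ts.foldl (pvStepA addresses) PySem.Dict.empty).items := rfl

theorem pvB_eq_foldl (addresses : List String) (ts : List (List (String × String))) :
    group_transactions_by_address_alt addresses ts =
      (((ts.foldl (pvStepK addresses) (PySem.Set.empty, PySem.Set.empty)).1).foldl
        (fun res a => res.insert a (ts.foldl (pvStepI a) [])) PySem.Dict.empty).items := rfl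

theorem pvKeys_mkMap (K : List String) (g : String → List (List (String × String))) :
    (pvMkMap K g).keys = K := by
  induction K with
  | nil => rfl
  | cons k K ih => simpa [pvMkMap, PySem.Dict.keys] using ih

theorem pvContains_mkMap (K : List String) (g : String → List (List (String × String))) (a : String) :
    (pvMkMap K g).contains a = decide (a ∈ K) := by
  have hiff := PySem.Dict.contains_iff_mem_keys (pvMkMap K g) a
  rw [pvKeys_mkMap] at hiff
  by_cases hmem : a ∈ K
  · simp [hiff.2 hmem, hmem]
  · have : ¬ (pvMkMap K g).contains a = true := fun hc => hmem (hiff.1 hc)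
    simp [Bool.not_eq_true] at this
    simp [this, hmem]

theorem pvGetD_mkMap (K : List String) (g : String → List (List (String × String))) (hK : K.Nodup) (a : String) :
    (pvMkMap K g).getD a [] = if a ∈ K then g a else [] := by
  by_cases hm : a ∈ K
  · rw [if_pos hm]
    refine PySem.Dict.getD_of_mem_items _ ?_ ?_ _
    · exact List.mem_map.2 ⟨a, hm, rfl⟩
    · rw [pvKeys_mkMap]; exact hK
  · rw [if_neg hm]
    refine PySem.Dict.getD_of_not_contains _ _ ?_
    rw [pvContains_mkMap]; simp [hm]

theorem pvMkMap_congr (K : List String) (g g' : String → List (List (String × String)))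
    (h : ∀ j ∈ K, g j = g' j) : pvMkMap K g = pvMkMap K g' := by
  unfold pvMkMap
  congr 1
  apply List.map_congr_left
  intro j hj
  rw [h j hj]

theorem pvNodup_add (s : PySem.Set String) (x : String) (hs : s.Nodup) : (PySem.Set.add s x).Nodup := by
  unfold PySem.Set.add PySem.Set.contains
  split_ifs with hc
  · exact hs
  · have hx : x ∉ s := by simpa using hc
    refine List.Nodup.append hs (List.nodup_singleton x) ?_
    intro y hy hy'
    rw [List.mem_singleton] at hy'
    exact hx (hy' ▸ hy)

theorem pvInsert_mkMap (K : List String) (g : String → List (List (String × String))) (hK : K.Nodup)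
    (k : String) (v : List (List (String × String))) :
    (pvMkMap K g).insert k ((pvMkMap K g).getD k [] ++ v) =
      pvMkMap (PySem.Set.add K k) (fun j => if j = k then (if k ∈ K then g k else []) ++ v else g j) := by
  apply PySem.Dict.ext
  by_cases hm : k ∈ K
  · rw [PySem.Dict.items_insert_of_contains _ _ (by rw [pvContains_mkMap]; simp [hm])]
    have hadd : PySem.Set.add K k = K := by
      simp [PySem.Set.add, PySem.Set.contains, hm]
    rw [hadd, pvGetD_mkMap K g hK, if_pos hm]
    simp only [pvMkMap, List.map_map]
    apply List.map_congr_left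
    intro j hj
    by_cases hjk : j = k
    · subst hjk; simp
    · simp [hjk, Function.comp]
  · rw [PySem.Dict.items_insert_of_not_contains _ _ (by rw [pvContains_mkMap]; simp [hm])]
    have hadd : PySem.Set.add K k = K ++ [k] := by
      simp [PySem.Set.add, PySem.Set.contains, hm]
    rw [hadd, pvGetD_mkMap K g hK, if_neg hm]
    simp only [pvMkMap, List.map_append, List.map_cons, List.map_nil]
    congr 1
    apply List.map_congr_left
    intro j hj
    have hne : j ≠ k := fun e => hm (e ▸ hj)
    simp [hne]

theorem pvStepA_mkMap (addresses : List String) (K : List String) (g : String → List (List (String × String)))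
    (hK : K.Nodup) (t : List (String × String)) :
    pvStepA addresses (pvMkMap K g) t =
      pvMkMap (PySem.Set.update K (pvEvs addresses t))
        (fun j => (if j ∈ K then g j else []) ++ pvContrib addresses j t) := by
  unfold pvStepA pvEvs pvContrib
  rcases hf : (PySem.Dict.mk t).get? "from" with _ | fa <;>
    rcases ht : (PySem.Dict.mk t).get? "to" with _ | ta <;>
    simp only [hf, ht]
  -- from = none, to = none
  · simp only [List.append_nil]
    have : PySem.Set.update K ([] : List String) = K := rfl
    rw [this]
    exact (pvMkMap_congr K _ _ (fun j hj => by simp [hj])).symm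
  -- from = none, to = some ta
  · by_cases h2 : ta ∈ addresses ∧ some ta ≠ (none : Option String)
    · have het : (if ta ∈ addresses ∧ some ta ≠ (none : Option String) then [ta] else ([] : List String)) = [ta] := if_pos h2
      rw [het, if_pos h2]
      rw [pvInsert_mkMap K g hK ta [t]]
      have hupd : PySem.Set.update K ([] ++ [ta]) = PySem.Set.add K ta := rfl
      rw [hupd]
      apply pvMkMap_congr
      intro j hj
      rw [PySem.Set.mem_add] at hj
      by_cases hjt : j = ta
      · subst hjt
        simp [h2.1]
      · have : ¬ (ta ∈ addresses ∧ some ta ≠ (none : Option String) ∧ ta = j) :=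
          fun hc => hjt (hc.2.2.symm)
        rcases hj with hj | hj
        · simp [hjt, hj, this] <;> tauto
        · exact absurd hj hjt
    · have h2' : ¬ ta ∈ addresses := by
        intro hta; exact h2 ⟨hta, by simp⟩
      have het : (if ta ∈ addresses ∧ some ta ≠ (none : Option String) then [ta] else ([] : List String)) = [] := if_neg h2
      rw [het, if_neg h2]
      have hupd : PySem.Set.update K ([] ++ ([] : List String)) = K := rfl
      rw [hupd]
      refine (pvMkMap_congr K _ _ (fun j hj => ?_)).symm
      have : ¬ (ta ∈ addresses ∧ some ta ≠ (none : Option String) ∧ ta = j) :=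
        fun hc => h2 ⟨hc.1, hc.2.1⟩
      simp [hj, this, h2']
  -- from = some fa, to = none
  · by_cases h1 : fa ∈ addresses
    · have hef : (if fa ∈ addresses then [fa] else ([] : List String)) = [fa] := if_pos h1
      rw [hef, if_pos h1, pvInsert_mkMap K g hK fa [t]]
      have hupd : PySem.Set.update K ([fa] ++ ([] : List String)) = PySem.Set.add K fa := rfl
      rw [hupd]
      apply pvMkMap_congr
      intro j hj
      by_cases hjf : j = fa
      · subst hjf; simp [h1]
      · rw [PySem.Set.mem_add] at hj
        rcases hj with hj | hj
        · simp [hjf, hj] <;> tauto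
        · exact absurd hj hjf
    · have hef : (if fa ∈ addresses then [fa] else ([] : List String)) = [] := if_neg h1
      rw [hef, if_neg h1]
      have hupd : PySem.Set.update K (([] : List String) ++ ([] : List String)) = K := rfl
      rw [hupd]
      refine (pvMkMap_congr K _ _ (fun j hj => ?_)).symm
      have : ¬ (fa ∈ addresses ∧ fa = j) := fun hc => h1 hc.1
      simp [hj, this]
  -- from = some fa, to = some ta
  · by_cases h1 : fa ∈ addresses
    · have hef : (if fa ∈ addresses then [fa] else ([] : List String)) = [fa] := if_pos h1
      rw [hef, if_pos h1, pvInsert_mkMap K g hK fa [t]]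
      by_cases h2 : ta ∈ addresses ∧ some ta ≠ some fa
      · have htf : ta ≠ fa := by
          intro e; exact h2.2 (by rw [e])
        have het : (if ta ∈ addresses ∧ some ta ≠ some fa then [ta] else ([] : List String)) = [ta] := if_pos h2
        rw [het, if_pos h2, pvInsert_mkMap _ _ (pvNodup_add K fa hK) ta [t]]
        have hupd : PySem.Set.update K ([fa] ++ [ta]) = PySem.Set.add (PySem.Set.add K fa) ta := rfl
        rw [hupd]
        apply pvMkMap_congr
        intro j hj
        by_cases hjt : j = ta
        · subst hjt
          have hmem : (j ∈ PySem.Set.add K fa) ↔ j ∈ K :=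
            ⟨fun h => ((PySem.Set.mem_add K fa j).1 h).elim id fun e => absurd e htf,
             fun h => (PySem.Set.mem_add K fa j).2 (Or.inl h)⟩
          have hfj : ¬ (fa ∈ addresses ∧ fa = j) := fun hc => htf hc.2.symm
          by_cases hk : j ∈ K
          · rw [if_pos rfl, if_pos (hmem.2 hk), if_neg htf, if_pos hk]
            simp [hfj, h2.1, htf]
          · rw [if_pos rfl, if_neg (fun hc => hk (hmem.1 hc)), if_neg hk]
            simp [hfj, h2.1, htf]
        · by_cases hjf : j = fa
          · subst hjf
            simp [hjt, h1] <;> tauto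
          · rw [if_neg hjt, if_neg hjf]
            have hjK : j ∈ K := by
              rcases (PySem.Set.mem_add (PySem.Set.add K fa) ta j).1 hj with h | h
              · rcases (PySem.Set.mem_add K fa j).1 h with h' | h'
                · exact h'
                · exact absurd h' hjf
              · exact absurd h hjt
            have hc1 : ¬ (fa ∈ addresses ∧ fa = j) := fun hc => hjf hc.2.symm
            have hc2 : ¬ (ta ∈ addresses ∧ some ta ≠ some fa ∧ ta = j) := fun hc => hjt hc.2.2.symm
            simp [hjK, hc1, hc2] <;> tauto
      · have het : (if ta ∈ addresses ∧ some ta ≠ some fa then [ta] else ([] : List String)) = [] := if_neg h2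
        rw [het, if_neg h2]
        have hupd : PySem.Set.update K ([fa] ++ ([] : List String)) = PySem.Set.add K fa := rfl
        rw [hupd]
        apply pvMkMap_congr
        intro j hj
        have hc2 : ¬ (ta ∈ addresses ∧ some ta ≠ some fa ∧ ta = j) := fun hc => h2 ⟨hc.1, hc.2.1⟩
        by_cases hjf : j = fa
        · subst hjf; simp [h1, hc2]
        · rw [PySem.Set.mem_add] at hj
          rcases hj with hj | hj
          · simp [hjf, hj, hc2]
            refine ⟨fun _ e => hjf e.symm, fun hta hne _ => ?_⟩
            exact h2 ⟨hta, fun hh => hne (Option.some.inj hh)⟩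
          · exact absurd hj hjf
    · have hef : (if fa ∈ addresses then [fa] else ([] : List String)) = [] := if_neg h1
      rw [hef, if_neg h1]
      by_cases h2 : ta ∈ addresses ∧ some ta ≠ some fa
      · have het : (if ta ∈ addresses ∧ some ta ≠ some fa then [ta] else ([] : List String)) = [ta] := if_pos h2
        rw [het, if_pos h2, pvInsert_mkMap K g hK ta [t]]
        have hupd : PySem.Set.update K (([] : List String) ++ [ta]) = PySem.Set.add K ta := rfl
        rw [hupd]
        apply pvMkMap_congr
        intro j hj
        have hc1 : ¬ (fa ∈ addresses ∧ fa = j) := fun hc => h1 hc.1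
        by_cases hjt : j = ta
        · subst hjt; simp [h2, hc1]
        · rw [PySem.Set.mem_add] at hj
          rcases hj with hj | hj
          · have hc2 : ¬ (ta ∈ addresses ∧ some ta ≠ some fa ∧ ta = j) := fun hc => hjt hc.2.2.symm
            simp [hjt, hj, hc1, hc2] <;> tauto
          · exact absurd hj hjt
      · have het : (if ta ∈ addresses ∧ some ta ≠ some fa then [ta] else ([] : List String)) = [] := if_neg h2
        rw [het, if_neg h2]
        have hupd : PySem.Set.update K (([] : List String) ++ ([] : List String)) = K := rfl
        rw [hupd]
        refine (pvMkMap_congr K _ _ (fun j hj => ?_)).symm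
        have hc1 : ¬ (fa ∈ addresses ∧ fa = j) := fun hc => h1 hc.1
        have hc2 : ¬ (ta ∈ addresses ∧ some ta ≠ some fa ∧ ta = j) := fun hc => h2 ⟨hc.1, hc.2.1⟩
        simp [hj, hc1, hc2]
        intro hta hne _
        exact h2 ⟨hta, fun hh => hne (Option.some.inj hh)⟩

theorem pvContrib_ne_nil (addresses : List String) (a : String) (t : List (String × String))
    (h : pvContrib addresses a t ≠ []) : a ∈ pvEvs addresses t := by
  unfold pvContrib at h
  unfold pvEvs
  rcases hf : (PySem.Dict.mk t).get? "from" with _ | fa <;>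
    rcases ht : (PySem.Dict.mk t).get? "to" with _ | ta <;>
    simp only [hf, ht] at h ⊢ <;>
    first
    | (split_ifs at h ⊢ <;> simp_all <;> aesop)
    | simp_all

theorem pvCollect_eq_nil (addresses : List String) (a : String) (ts : List (List (String × String)))
    (h : a ∉ ts.flatMap (pvEvs addresses)) : pvCollect addresses a ts = [] := by
  unfold pvCollect
  rw [List.flatMap_eq_nil_iff]
  intro t ht
  by_contra hne
  exact h (List.mem_flatMap.2 ⟨t, ht, pvContrib_ne_nil addresses a t hne⟩)

theorem pvEvs_subset (addresses : List String) (a : String) (t : List (String × String))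
    (h : a ∈ pvEvs addresses t) : a ∈ addresses := by
  unfold pvEvs at h
  rcases hf : (PySem.Dict.mk t).get? "from" with _ | fa <;>
    rcases ht : (PySem.Dict.mk t).get? "to" with _ | ta <;>
    simp only [hf, ht] at h <;>
    first
    | (split_ifs at h <;> simp_all <;> aesop)
    | simp_all

theorem pvFoldA (addresses : List String) (ts : List (List (String × String))) :
    ts.foldl (pvStepA addresses) PySem.Dict.empty =
      pvMkMap (PySem.Set.ofList (ts.flatMap (pvEvs addresses))) (fun k => pvCollect addresses k ts) := by
  induction ts using List.reverseRecOn with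
  | nil => rfl
  | append_singleton ts t ih =>
      rw [List.foldl_append, List.foldl_cons, List.foldl_nil, ih,
        pvStepA_mkMap addresses _ _ (PySem.Set.nodup_ofList _) t]
      have hK' : PySem.Set.update (PySem.Set.ofList (ts.flatMap (pvEvs addresses))) (pvEvs addresses t)
          = PySem.Set.ofList ((ts ++ [t]).flatMap (pvEvs addresses)) := by
        simp only [PySem.Set.ofList, PySem.Set.update, List.flatMap_append, List.foldl_append,
          List.flatMap_cons, List.flatMap_nil, List.append_nil]
      rw [hK']
      apply pvMkMap_congr
      intro j hj
      by_cases hjk : j ∈ ts.flatMap (pvEvs addresses)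
      · rw [if_pos ((PySem.Set.mem_ofList _ _).2 hjk)]
        simp [pvCollect, List.flatMap_append]
      · have hnot : j ∉ PySem.Set.ofList (ts.flatMap (pvEvs addresses)) :=
          fun hc => hjk ((PySem.Set.mem_ofList _ _).1 hc)
        rw [if_neg hnot]
        have hnil := pvCollect_eq_nil addresses j ts hjk
        simp only [pvCollect, List.flatMap_append, List.flatMap_cons, List.flatMap_nil,
          List.append_nil] at hnil ⊢
        simp [hnil]

theorem pvStepK_diag (addresses : List String) (s : PySem.Set String) (t : List (String × String)) :
    pvStepK addresses (s, s) t =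
      (PySem.Set.update s (pvEvs addresses t), PySem.Set.update s (pvEvs addresses t)) := by
  have hca : ∀ x : String, (PySem.Set.contains (PySem.Set.ofList addresses) x = true) ↔ x ∈ addresses := by
    intro x
    simp [PySem.Set.contains, PySem.Set.mem_ofList]
  have hcs : ∀ (u : PySem.Set String) (x : String), (PySem.Set.contains u x = true) ↔ x ∈ u := by
    intro u x; simp [PySem.Set.contains]
  have hadd_mem : ∀ (u : PySem.Set String) (x : String), x ∈ u → PySem.Set.add u x = u := by
    intro u x hx; simp [PySem.Set.add, PySem.Set.contains, hx]
  have hadd_not : ∀ (u : PySem.Set String) (x : String), x ∉ u → PySem.Set.add u x = u ++ [x] := by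
    intro u x hx; simp [PySem.Set.add, PySem.Set.contains, hx]
  unfold pvStepK pvEvs
  rcases hf : (PySem.Dict.mk t).get? "from" with _ | fa <;>
    rcases ht : (PySem.Dict.mk t).get? "to" with _ | ta <;>
    simp only [hf, ht]
  -- none, none
  · rfl
  -- none, some ta
  · by_cases h2 : ta ∈ addresses ∧ some ta ≠ (none : Option String)
    · have het : (if ta ∈ addresses ∧ some ta ≠ (none : Option String) then [ta] else ([] : List String)) = [ta] := if_pos h2
      rw [het]
      by_cases hseen : ta ∈ s
      · rw [if_neg (fun hc => hc.2.2 ((hcs s ta).2 hseen))]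
        simp [PySem.Set.update, hadd_mem s ta hseen]
      · rw [if_pos ⟨(hca ta).2 h2.1, h2.2, fun hc => hseen ((hcs s ta).1 hc)⟩]
        simp [PySem.Set.update, hadd_not s ta hseen]
    · have het : (if ta ∈ addresses ∧ some ta ≠ (none : Option String) then [ta] else ([] : List String)) = [] := if_neg h2
      rw [het]
      have : ¬ (PySem.Set.contains (PySem.Set.ofList addresses) ta = true ∧ some ta ≠ (none : Option String) ∧ ¬ PySem.Set.contains s ta = true) :=
        fun hc => h2 ⟨(hca ta).1 hc.1, hc.2.1⟩
      rw [if_neg this]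
      rfl
  -- some fa, none
  · by_cases h1 : fa ∈ addresses
    · have hef : (if fa ∈ addresses then [fa] else ([] : List String)) = [fa] := if_pos h1
      rw [hef]
      by_cases hseen : fa ∈ s
      · rw [if_neg (fun hc => hc.2 ((hcs s fa).2 hseen))]
        simp [PySem.Set.update, hadd_mem s fa hseen]
      · rw [if_pos ⟨(hca fa).2 h1, fun hc => hseen ((hcs s fa).1 hc)⟩]
        simp [PySem.Set.update, hadd_not s fa hseen]
    · have hef : (if fa ∈ addresses then [fa] else ([] : List String)) = [] := if_neg h1
      rw [hef, if_neg (fun hc => h1 ((hca fa).1 hc.1))]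
      rfl
  -- some fa, some ta
  · by_cases h1 : fa ∈ addresses
    · have hef : (if fa ∈ addresses then [fa] else ([] : List String)) = [fa] := if_pos h1
      rw [hef]
      have h1eq : (if ((PySem.Set.ofList addresses).contains fa = true ∧ ¬ PySem.Set.contains s fa = true)
            then (s ++ [fa], PySem.Set.add s fa) else (s, s))
          = (PySem.Set.add s fa, PySem.Set.add s fa) := by
        by_cases hseen : fa ∈ s
        · rw [if_neg (fun hc => hc.2 ((hcs s fa).2 hseen)), hadd_mem s fa hseen]
        · rw [if_pos ⟨(hca fa).2 h1, fun hc => hseen ((hcs s fa).1 hc)⟩, hadd_not s fa hseen]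
      rw [h1eq]
      by_cases h2 : ta ∈ addresses ∧ some ta ≠ some fa
      · have het : (if ta ∈ addresses ∧ some ta ≠ some fa then [ta] else ([] : List String)) = [ta] := if_pos h2
        rw [het]
        by_cases hseen2 : ta ∈ PySem.Set.add s fa
        · rw [if_neg (fun hc => hc.2.2 ((hcs _ ta).2 hseen2))]
          simp [PySem.Set.update, hadd_mem _ ta hseen2]
        · rw [if_pos ⟨(hca ta).2 h2.1, h2.2, fun hc => hseen2 ((hcs _ ta).1 hc)⟩]
          simp [PySem.Set.update, hadd_not _ ta hseen2]
      · have het : (if ta ∈ addresses ∧ some ta ≠ some fa then [ta] else ([] : List String)) = [] := if_neg h2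
        rw [het, if_neg (fun hc => h2 ⟨(hca ta).1 hc.1, hc.2.1⟩)]
        simp [PySem.Set.update]
    · have hef : (if fa ∈ addresses then [fa] else ([] : List String)) = [] := if_neg h1
      rw [hef]
      have h1eq : (if ((PySem.Set.ofList addresses).contains fa = true ∧ ¬ PySem.Set.contains s fa = true)
            then (s ++ [fa], PySem.Set.add s fa) else (s, s)) = (s, s) :=
        if_neg (fun hc => h1 ((hca fa).1 hc.1))
      rw [h1eq]
      by_cases h2 : ta ∈ addresses ∧ some ta ≠ some fa
      · have het : (if ta ∈ addresses ∧ some ta ≠ some fa then [ta] else ([] : List String)) = [ta] := if_pos h2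
        rw [het]
        by_cases hseen2 : ta ∈ s
        · rw [if_neg (fun hc => hc.2.2 ((hcs s ta).2 hseen2))]
          simp [PySem.Set.update, hadd_mem s ta hseen2]
        · rw [if_pos ⟨(hca ta).2 h2.1, h2.2, fun hc => hseen2 ((hcs s ta).1 hc)⟩]
          simp [PySem.Set.update, hadd_not s ta hseen2]
      · have het : (if ta ∈ addresses ∧ some ta ≠ some fa then [ta] else ([] : List String)) = [] := if_neg h2
        rw [het, if_neg (fun hc => h2 ⟨(hca ta).1 hc.1, hc.2.1⟩)]
        rfl

theorem pvFoldK (addresses : List String) (ts : List (List (String × String))) :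
    ∀ s : PySem.Set String,
      ts.foldl (pvStepK addresses) (s, s) =
        (PySem.Set.update s (ts.flatMap (pvEvs addresses)), PySem.Set.update s (ts.flatMap (pvEvs addresses))) := by
  induction ts with
  | nil => intro s; rfl
  | cons t ts ih =>
      intro s
      rw [List.foldl_cons, pvStepK_diag, ih]
      simp only [List.flatMap_cons, PySem.Set.update, List.foldl_append]

theorem pvStepI_contrib (addresses : List String) (a : String) (ha : a ∈ addresses)
    (acc : List (List (String × String))) (t : List (String × String)) :
    pvStepI a acc t = acc ++ pvContrib addresses a t := by
  unfold pvStepI pvContrib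
  rcases hf : (PySem.Dict.mk t).get? "from" with _ | fa <;>
    rcases ht : (PySem.Dict.mk t).get? "to" with _ | ta <;>
    simp only [hf, ht] <;>
    first
    | (split_ifs <;> simp_all <;> tauto)
    | simp_all

theorem pvFoldI (addresses : List String) (a : String) (ha : a ∈ addresses)
    (ts : List (List (String × String))) :
    ∀ acc, ts.foldl (pvStepI a) acc = acc ++ pvCollect addresses a ts := by
  induction ts with
  | nil => intro acc; simp [pvCollect]
  | cons t ts ih =>
      intro acc
      rw [List.foldl_cons, ih, pvStepI_contrib addresses a ha]
      simp [pvCollect, List.append_assoc]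

-- ===== VERDICT (by name: the statement is the Claim_ definition above) =====
theorem group_transactions_by_address_spec : Claim_equal_group_transactions_by_address := by
  intro addresses ts _
  show group_transactions_by_address addresses ts = group_transactions_by_address_alt addresses ts
  rw [pvA_eq_foldl, pvB_eq_foldl, pvFoldA, pvFoldK]
  have hks : PySem.Set.update PySem.Set.empty (ts.flatMap (pvEvs addresses))
      = PySem.Set.ofList (ts.flatMap (pvEvs addresses)) := rfl
  rw [hks]
  rw [PySem.Dict.items_foldl_insert_fresh _ (fun a => a) _ _
        (by intro a _; simp) (by simpa using PySem.Set.nodup_ofList _)]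
  have hemp : PySem.Dict.empty.items = ([] : List (String × List (List (String × String)))) := rfl
  rw [hemp, List.nil_append]
  have hmk : (pvMkMap (PySem.Set.ofList (ts.flatMap (pvEvs addresses))) (fun k => pvCollect addresses k ts)).items
      = (PySem.Set.ofList (ts.flatMap (pvEvs addresses))).map (fun k => (k, pvCollect addresses k ts)) := rfl
  rw [hmk]
  apply List.map_congr_left
  intro a ha
  have haddr : a ∈ addresses := by
    rcases List.mem_flatMap.1 ((PySem.Set.mem_ofList _ _).1 ha) with ⟨t, ht, hev⟩
    exact pvEvs_subset addresses a t hev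
  simp [pvFoldI addresses a haddr ts []]
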